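-- pv_equiv track=rewrite | github.com/P-Paths/global-empowerment-platform | backend/app/agents/visual_agent.py | _extract_car_features
-- ===== SOURCE A (Python) =====
-- from typing import Dict, Any, List, Optional
--
-- def _extract_car_features(labels: List[str], objects: List[str],
--                          texts: List[str], car_info: Dict = None) -> Dict[str, List[str]]:
--     """Extract car-specific features from Vision API results"""
--     features = {
--         "exterior": [],
--         "interior": [],
--         "technology": [],
--         "safety": [],
--         "modifications": []
--     }
--
--     # Exterior features
--     exterior_keywords = ["wheel", "tire", "headlight", "taillight", "mirror", "door", "window", "sunroof", "spoiler"]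
--     for label in labels:
--         if any(keyword in label for keyword in exterior_keywords):
--             features["exterior"].append(label)
--
--     # Interior features
--     interior_keywords = ["seat", "steering wheel", "dashboard", "console", "carpet", "leather"]
--     for label in labels:
--         if any(keyword in label for keyword in interior_keywords):
--             features["interior"].append(label)
--
--     # Technology features
--     tech_keywords = ["screen", "display", "camera", "navigation", "bluetooth", "speaker"]
--     for label in labels:
--         if any(keyword in label for keyword in tech_keywords):
--             features["technology"].append(label)
--
--     # Safety features
--     safety_keywords = ["airbag", "sensor", "light", "brake"]
--     for label in labels:
--         if any(keyword in label for keyword in safety_keywords):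
--             features["safety"].append(label)
--
--     # Modifications (aftermarket)
--     mod_keywords = ["tinted", "aftermarket", "custom", "performance"]
--     for label in labels:
--         if any(keyword in label for keyword in mod_keywords):
--             features["modifications"].append(label)
--
--     return features
-- ===== SOURCE B (Python) =====
-- from typing import Dict, Any, List, Optional
--
-- _KEYWORD_CATEGORY = {
--     "wheel": "exterior", "tire": "exterior", "headlight": "exterior", "taillight": "exterior",
--     "mirror": "exterior", "door": "exterior", "window": "exterior", "sunroof": "exterior", "spoiler": "exterior",
--     "seat": "interior", "steering wheel": "interior", "dashboard": "interior", "console": "interior",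
--     "carpet": "interior", "leather": "interior",
--     "screen": "technology", "display": "technology", "camera": "technology", "navigation": "technology",
--     "bluetooth": "technology", "speaker": "technology",
--     "airbag": "safety", "sensor": "safety", "light": "safety", "brake": "safety",
--     "tinted": "modifications", "aftermarket": "modifications", "custom": "modifications", "performance": "modifications",
-- }
-- _KEYWORD_LENGTHS = sorted({len(k) for k in _KEYWORD_CATEGORY})
-- _CATEGORIES = ["exterior", "interior", "technology", "safety", "modifications"]
--
-- def _extract_car_features(labels: List[str], objects: List[str],
--                           texts: List[str], car_info: Dict = None) -> Dict[str, List[str]]: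
--     """Extract car features: scan each label's substrings and hash-look them up
--     in a keyword->category map, instead of testing every keyword against every label."""
--     features = {category: [] for category in _CATEGORIES}
--     for label in labels:
--         hit = set()
--         for i in range(len(label)):
--             for length in _KEYWORD_LENGTHS:
--                 category = _KEYWORD_CATEGORY.get(label[i:i + length])
--                 if category is not None:
--                     hit.add(category)
--         for category in _CATEGORIES:
--             if category in hit:
--                 features[category].append(label)
--     return features
-- ===== Notes on version B (the rewrite author's own statement) =====
-- stated objective: alternative
-- what changed: Instead of A's five passes testing every keyword as a substring of every label, B enumerates each label's substrings at the known keyword lengths and hash-looks them up in a keyword->category map, collecting per-label category hits in a set before filling the buckets.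
import Mathlib
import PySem

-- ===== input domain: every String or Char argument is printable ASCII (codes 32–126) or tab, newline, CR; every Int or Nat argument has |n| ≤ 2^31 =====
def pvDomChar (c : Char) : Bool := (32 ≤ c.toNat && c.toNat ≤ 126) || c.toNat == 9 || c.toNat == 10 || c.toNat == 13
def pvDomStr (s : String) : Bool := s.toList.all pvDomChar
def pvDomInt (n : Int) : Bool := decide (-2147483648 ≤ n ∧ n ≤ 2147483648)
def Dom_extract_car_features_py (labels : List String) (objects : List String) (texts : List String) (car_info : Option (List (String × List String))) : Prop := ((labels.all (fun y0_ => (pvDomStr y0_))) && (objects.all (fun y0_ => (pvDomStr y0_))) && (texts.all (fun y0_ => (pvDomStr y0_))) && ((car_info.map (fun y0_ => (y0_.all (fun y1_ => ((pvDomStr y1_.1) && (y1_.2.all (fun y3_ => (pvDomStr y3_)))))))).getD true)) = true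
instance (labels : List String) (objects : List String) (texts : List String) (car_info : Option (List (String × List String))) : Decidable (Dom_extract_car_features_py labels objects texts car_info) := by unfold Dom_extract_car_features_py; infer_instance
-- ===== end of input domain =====

-- B replaces A's per-keyword substring tests with substring enumeration of each label at the known keyword lengths, looked up in a keyword→category dict; same results, proved equal.


-- ===== PORT A =====
-- A scans `labels` five times, one scan per hard-coded bucket, testing every keyword as a substring of every label.
def extract_car_features_py (labels : List String) (objects : List String) (texts : List String) (car_info : Option (List (String × List String))) : List (String × List String) :=
  let features : PySem.Dict String (List String) :=
    PySem.Dict.ofList [("exterior", []), ("interior", []), ("technology", []), ("safety", []), ("modifications", [])]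
  let exterior_keywords := ["wheel", "tire", "headlight", "taillight", "mirror", "door", "window", "sunroof", "spoiler"]
  let features := labels.foldl (fun d label =>
    if exterior_keywords.any (fun keyword => PySem.Str.isIn keyword label) then d.modify "exterior" [] (· ++ [label]) else d) features
  let interior_keywords := ["seat", "steering wheel", "dashboard", "console", "carpet", "leather"]
  let features := labels.foldl (fun d label =>
    if interior_keywords.any (fun keyword => PySem.Str.isIn keyword label) then d.modify "interior" [] (· ++ [label]) else d) features
  let tech_keywords := ["screen", "display", "camera", "navigation", "bluetooth", "speaker"]
  let features := labels.foldl (fun d label =>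
    if tech_keywords.any (fun keyword => PySem.Str.isIn keyword label) then d.modify "technology" [] (· ++ [label]) else d) features
  let safety_keywords := ["airbag", "sensor", "light", "brake"]
  let features := labels.foldl (fun d label =>
    if safety_keywords.any (fun keyword => PySem.Str.isIn keyword label) then d.modify "safety" [] (· ++ [label]) else d) features
  let mod_keywords := ["tinted", "aftermarket", "custom", "performance"]
  let features := labels.foldl (fun d label =>
    if mod_keywords.any (fun keyword => PySem.Str.isIn keyword label) then d.modify "modifications" [] (· ++ [label]) else d) features
  features.items

-- ===== PORT B =====
-- B: a keyword → category dict; each label's substrings at the known keyword lengths are looked up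
-- in it, collecting the hit categories in a set, then the buckets are filled from the hits.
def pvKwPairs : List (String × String) :=
  [("wheel", "exterior"), ("tire", "exterior"), ("headlight", "exterior"), ("taillight", "exterior"),
   ("mirror", "exterior"), ("door", "exterior"), ("window", "exterior"), ("sunroof", "exterior"), ("spoiler", "exterior"),
   ("seat", "interior"), ("steering wheel", "interior"), ("dashboard", "interior"), ("console", "interior"),
   ("carpet", "interior"), ("leather", "interior"),
   ("screen", "technology"), ("display", "technology"), ("camera", "technology"), ("navigation", "technology"),
   ("bluetooth", "technology"), ("speaker", "technology"),
   ("airbag", "safety"), ("sensor", "safety"), ("light", "safety"), ("brake", "safety"),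
   ("tinted", "modifications"), ("aftermarket", "modifications"), ("custom", "modifications"), ("performance", "modifications")]

def pvKwCat : PySem.Dict String String := PySem.Dict.ofList pvKwPairs

-- _KEYWORD_LENGTHS = sorted({len(k) for k in _KEYWORD_CATEGORY})
def pvKwLens : List Int := PySem.List.sorted (PySem.Set.ofList (pvKwCat.keys.map PySem.Str.len)) (fun x => x) false

def pvCategories : List String := ["exterior", "interior", "technology", "safety", "modifications"]

-- hit = set(); for i in range(len(label)): for length in _KEYWORD_LENGTHS: category = dict.get(label[i:i+length]); if category is not None: hit.add(category)
def pvHitFor (label : String) : PySem.Set String :=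
  (PySem.List.pyRange 0 (PySem.Str.len label) 1).foldl (fun hit i =>
    pvKwLens.foldl (fun hit length =>
      match pvKwCat.get? (PySem.Str.slice label (some i) (some (i + length))) with
      | some category => hit.add category
      | none => hit) hit) PySem.Set.empty

def extract_car_features_py_alt (labels : List String) (objects : List String) (texts : List String) (car_info : Option (List (String × List String))) : List (String × List String) :=
  let features : PySem.Dict String (List String) :=
    pvCategories.foldl (fun d category => d.insert category []) PySem.Dict.empty
  let features := labels.foldl (fun d label =>
    let hit := pvHitFor label
    pvCategories.foldl (fun d category =>
      if PySem.Set.contains hit category then d.modify category [] (· ++ [label]) else d) d) features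
  features.items

-- ===== PRECONDITION & SPEC =====
def Spec_extract_car_features_py (labels : List String) (objects : List String) (texts : List String) (car_info : Option (List (String × List String))) (out : List (String × List String)) : Prop := out = extract_car_features_py_alt labels objects texts car_info
instance (labels : List String) (objects : List String) (texts : List String) (car_info : Option (List (String × List String))) (out : List (String × List String)) : Decidable (Spec_extract_car_features_py labels objects texts car_info out) := by unfold Spec_extract_car_features_py; infer_instance

-- ===== CLAIM (what is proved, stated in full; the proofs are below) =====
def Claim_equal_extract_car_features_py : Prop := ∀ (labels : List String) (objects : List String) (texts : List String) (car_info : Option (List (String × List String))), Dom_extract_car_features_py labels objects texts car_info → Spec_extract_car_features_py labels objects texts car_info (extract_car_features_py labels objects texts car_info)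

-- ===== LEMMAS AND PROOFS =====
def mkFeat (v1 v2 v3 v4 v5 : List String) : PySem.Dict String (List String) :=
  PySem.Dict.mk [("exterior", v1), ("interior", v2), ("technology", v3), ("safety", v4), ("modifications", v5)]

lemma loop_key1 (p : String → Bool) (ls v1 v2 v3 v4 v5 : List String) :
    ls.foldl (fun d l => if p l then d.modify "exterior" [] (· ++ [l]) else d) (mkFeat v1 v2 v3 v4 v5)
      = mkFeat (v1 ++ ls.filter p) v2 v3 v4 v5 := by
  induction ls generalizing v1 with
  | nil => simp
  | cons l ls ih =>
    rw [List.foldl_cons]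
    by_cases h : p l
    · rw [if_pos h]
      have e : (mkFeat v1 v2 v3 v4 v5).modify "exterior" [] (· ++ [l]) = mkFeat (v1 ++ [l]) v2 v3 v4 v5 := rfl
      rw [e, ih, List.filter_cons, if_pos h]
      simp
    · rw [if_neg h, ih, List.filter_cons, if_neg h]

lemma loop_key2 (p : String → Bool) (ls v1 v2 v3 v4 v5 : List String) :
    ls.foldl (fun d l => if p l then d.modify "interior" [] (· ++ [l]) else d) (mkFeat v1 v2 v3 v4 v5)
      = mkFeat v1 (v2 ++ ls.filter p) v3 v4 v5 := by
  induction ls generalizing v2 with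
  | nil => simp
  | cons l ls ih =>
    rw [List.foldl_cons]
    by_cases h : p l
    · rw [if_pos h]
      have e : (mkFeat v1 v2 v3 v4 v5).modify "interior" [] (· ++ [l]) = mkFeat v1 (v2 ++ [l]) v3 v4 v5 := rfl
      rw [e, ih, List.filter_cons, if_pos h]
      simp
    · rw [if_neg h, ih, List.filter_cons, if_neg h]

lemma loop_key3 (p : String → Bool) (ls v1 v2 v3 v4 v5 : List String) :
    ls.foldl (fun d l => if p l then d.modify "technology" [] (· ++ [l]) else d) (mkFeat v1 v2 v3 v4 v5)
      = mkFeat v1 v2 (v3 ++ ls.filter p) v4 v5 := by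
  induction ls generalizing v3 with
  | nil => simp
  | cons l ls ih =>
    rw [List.foldl_cons]
    by_cases h : p l
    · rw [if_pos h]
      have e : (mkFeat v1 v2 v3 v4 v5).modify "technology" [] (· ++ [l]) = mkFeat v1 v2 (v3 ++ [l]) v4 v5 := rfl
      rw [e, ih, List.filter_cons, if_pos h]
      simp
    · rw [if_neg h, ih, List.filter_cons, if_neg h]

lemma loop_key4 (p : String → Bool) (ls v1 v2 v3 v4 v5 : List String) :
    ls.foldl (fun d l => if p l then d.modify "safety" [] (· ++ [l]) else d) (mkFeat v1 v2 v3 v4 v5)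
      = mkFeat v1 v2 v3 (v4 ++ ls.filter p) v5 := by
  induction ls generalizing v4 with
  | nil => simp
  | cons l ls ih =>
    rw [List.foldl_cons]
    by_cases h : p l
    · rw [if_pos h]
      have e : (mkFeat v1 v2 v3 v4 v5).modify "safety" [] (· ++ [l]) = mkFeat v1 v2 v3 (v4 ++ [l]) v5 := rfl
      rw [e, ih, List.filter_cons, if_pos h]
      simp
    · rw [if_neg h, ih, List.filter_cons, if_neg h]

lemma loop_key5 (p : String → Bool) (ls v1 v2 v3 v4 v5 : List String) :
    ls.foldl (fun d l => if p l then d.modify "modifications" [] (· ++ [l]) else d) (mkFeat v1 v2 v3 v4 v5)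
      = mkFeat v1 v2 v3 v4 (v5 ++ ls.filter p) := by
  induction ls generalizing v5 with
  | nil => simp
  | cons l ls ih =>
    rw [List.foldl_cons]
    by_cases h : p l
    · rw [if_pos h]
      have e : (mkFeat v1 v2 v3 v4 v5).modify "modifications" [] (· ++ [l]) = mkFeat v1 v2 v3 v4 (v5 ++ [l]) := rfl
      rw [e, ih, List.filter_cons, if_pos h]
      simp
    · rw [if_neg h, ih, List.filter_cons, if_neg h]

lemma condModify_key1 (c : Bool) (l : String) (v1 v2 v3 v4 v5 : List String) :
    (if c then (mkFeat v1 v2 v3 v4 v5).modify "exterior" [] (· ++ [l]) else mkFeat v1 v2 v3 v4 v5)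
      = mkFeat (if c then v1 ++ [l] else v1) v2 v3 v4 v5 := by
  cases c <;> rfl

lemma condModify_key2 (c : Bool) (l : String) (v1 v2 v3 v4 v5 : List String) :
    (if c then (mkFeat v1 v2 v3 v4 v5).modify "interior" [] (· ++ [l]) else mkFeat v1 v2 v3 v4 v5)
      = mkFeat v1 (if c then v2 ++ [l] else v2) v3 v4 v5 := by
  cases c <;> rfl

lemma condModify_key3 (c : Bool) (l : String) (v1 v2 v3 v4 v5 : List String) :
    (if c then (mkFeat v1 v2 v3 v4 v5).modify "technology" [] (· ++ [l]) else mkFeat v1 v2 v3 v4 v5)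
      = mkFeat v1 v2 (if c then v3 ++ [l] else v3) v4 v5 := by
  cases c <;> rfl

lemma condModify_key4 (c : Bool) (l : String) (v1 v2 v3 v4 v5 : List String) :
    (if c then (mkFeat v1 v2 v3 v4 v5).modify "safety" [] (· ++ [l]) else mkFeat v1 v2 v3 v4 v5)
      = mkFeat v1 v2 v3 (if c then v4 ++ [l] else v4) v5 := by
  cases c <;> rfl

lemma condModify_key5 (c : Bool) (l : String) (v1 v2 v3 v4 v5 : List String) :
    (if c then (mkFeat v1 v2 v3 v4 v5).modify "modifications" [] (· ++ [l]) else mkFeat v1 v2 v3 v4 v5)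
      = mkFeat v1 v2 v3 v4 (if c then v5 ++ [l] else v5) := by
  cases c <;> rfl

-- membership through a fold of set-transformers, each of which adds (at most) on one condition
lemma mem_foldl_iff {β : Type} (c : String) (g : PySem.Set String → β → PySem.Set String) (P : β → Prop)
    (hg : ∀ h x, c ∈ g h x ↔ c ∈ h ∨ P x) :
    ∀ (xs : List β) (s : PySem.Set String), c ∈ xs.foldl g s ↔ c ∈ s ∨ ∃ x ∈ xs, P x := by
  intro xs
  induction xs with
  | nil => simp
  | cons x xs ih =>
    intro s
    rw [List.foldl_cons, ih, hg]
    simp only [List.mem_cons]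
    constructor
    · rintro ((h | h) | ⟨y, hy, hP⟩)
      · exact Or.inl h
      · exact Or.inr ⟨x, Or.inl rfl, h⟩
      · exact Or.inr ⟨y, Or.inr hy, hP⟩
    · rintro (h | ⟨y, (rfl | hy), hP⟩)
      · exact Or.inl (Or.inl h)
      · exact Or.inl (Or.inr hP)
      · exact Or.inr ⟨y, hy, hP⟩

lemma mem_pvHitFor (label : String) (c : String) :
    c ∈ pvHitFor label ↔ ∃ i : Int, (0 ≤ i ∧ i < PySem.Str.len label) ∧
      ∃ L ∈ pvKwLens, pvKwCat.get? (PySem.Str.slice label (some i) (some (i + L))) = some c := by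
  unfold pvHitFor
  rw [mem_foldl_iff c _
      (fun i => ∃ L ∈ pvKwLens, pvKwCat.get? (PySem.Str.slice label (some i) (some (i + L))) = some c)]
  · simp only [PySem.Set.empty, List.not_mem_nil, false_or]
    constructor
    · rintro ⟨i, hi, h⟩
      exact ⟨i, PySem.List.mem_pyRange_one.mp hi, h⟩
    · rintro ⟨i, hi, h⟩
      exact ⟨i, PySem.List.mem_pyRange_one.mpr hi, h⟩
  · intro h i
    rw [mem_foldl_iff c _
        (fun L => pvKwCat.get? (PySem.Str.slice label (some i) (some (i + L))) = some c)]
    intro h' L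
    rcases hm : pvKwCat.get? (PySem.Str.slice label (some i) (some (i + L))) with _ | cat
    · simp [hm]
    · simp [PySem.Set.mem_add, eq_comm]

lemma get?_pvKwCat_mem (s c : String) (h : pvKwCat.get? s = some c) : (s, c) ∈ pvKwPairs := by
  rw [show pvKwCat = PySem.Dict.mk pvKwPairs from rfl] at h
  simp only [PySem.Dict.get?, Option.map_eq_some_iff] at h
  obtain ⟨p, hfind, hp2⟩ := h
  have hmem := List.mem_of_find?_eq_some hfind
  have h1 : p.1 = s := by simpa using List.find?_some hfind
  have he : (s, c) = p := by cases p; simp_all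
  rw [he]; exact hmem

lemma pvKwLens_nonneg : ∀ L ∈ pvKwLens, 0 ≤ L := by decide

-- the per-label hit set contains a category iff one of its keywords occurs in the label
lemma hit_eq_any (label : String) (c : String) (K : List String)
    (hK : ∀ kw, (kw, c) ∈ pvKwPairs ↔ kw ∈ K)
    (hlen : ∀ kw ∈ K, 0 < kw.toList.length ∧ ((kw.toList.length : Int) ∈ pvKwLens))
    (hget : ∀ kw ∈ K, pvKwCat.get? kw = some c) :
    PySem.Set.contains (pvHitFor label) c = K.any (fun keyword => PySem.Str.isIn keyword label) := by
  rw [Bool.eq_iff_iff, PySem.Set.contains_iff, mem_pvHitFor, List.any_eq_true]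
  constructor
  · rintro ⟨i, ⟨hi0, hilt⟩, L, hL, hget'⟩
    have hmem := get?_pvKwCat_mem _ _ hget'
    refine ⟨_, (hK _).mp hmem, ?_⟩
    rw [PySem.Str.isIn_iff_infix, PySem.Str.toList_slice, PySem.Chars.slice_eq_listSlice,
        PySem.List.slice_toNat _ hi0 (by have := pvKwLens_nonneg L hL; omega)]
    exact ((List.take_prefix _ _).isInfix).trans ((List.drop_suffix _ _).isInfix)
  · rintro ⟨kw, hkwK, hin⟩
    obtain ⟨t, u, htu⟩ := (PySem.Str.isIn_iff_infix _ _).mp hin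
    obtain ⟨hpos, hlens⟩ := hlen kw hkwK
    refine ⟨(t.length : Int), ⟨by positivity, ?_⟩, (kw.toList.length : Int), hlens, ?_⟩
    · rw [PySem.Str.len_eq, ← htu]
      push_cast
      simp only [List.length_append]
      omega
    · have hslice : PySem.Str.slice label (some (t.length : Int))
          (some ((t.length : Int) + (kw.toList.length : Int))) = kw := by
        apply String.toList_inj.mp
        rw [PySem.Str.toList_slice, PySem.Chars.slice_eq_listSlice,
            PySem.List.slice_natCast_add, ← htu, List.append_assoc, List.drop_left,
            List.take_left]
      rw [hslice]
      exact hget kw hkwK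

lemma hit_ext (label : String) :
    PySem.Set.contains (pvHitFor label) "exterior"
      = List.any ["wheel", "tire", "headlight", "taillight", "mirror", "door", "window", "sunroof", "spoiler"]
          (fun keyword => PySem.Str.isIn keyword label) := by
  apply hit_eq_any
  · intro kw; simp [pvKwPairs, Prod.ext_iff]
  · decide
  · decide

lemma hit_int (label : String) :
    PySem.Set.contains (pvHitFor label) "interior"
      = List.any ["seat", "steering wheel", "dashboard", "console", "carpet", "leather"]
          (fun keyword => PySem.Str.isIn keyword label) := by
  apply hit_eq_any
  · intro kw; simp [pvKwPairs, Prod.ext_iff]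
  · decide
  · decide

lemma hit_tech (label : String) :
    PySem.Set.contains (pvHitFor label) "technology"
      = List.any ["screen", "display", "camera", "navigation", "bluetooth", "speaker"]
          (fun keyword => PySem.Str.isIn keyword label) := by
  apply hit_eq_any
  · intro kw; simp [pvKwPairs, Prod.ext_iff]
  · decide
  · decide

lemma hit_safe (label : String) :
    PySem.Set.contains (pvHitFor label) "safety"
      = List.any ["airbag", "sensor", "light", "brake"]
          (fun keyword => PySem.Str.isIn keyword label) := by
  apply hit_eq_any
  · intro kw; simp [pvKwPairs, Prod.ext_iff]
  · decide
  · decide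

lemma hit_mod (label : String) :
    PySem.Set.contains (pvHitFor label) "modifications"
      = List.any ["tinted", "aftermarket", "custom", "performance"]
          (fun keyword => PySem.Str.isIn keyword label) := by
  apply hit_eq_any
  · intro kw; simp [pvKwPairs, Prod.ext_iff]
  · decide
  · decide

lemma loopB (ls v1 v2 v3 v4 v5 : List String) :
    ls.foldl (fun d label =>
      pvCategories.foldl (fun d category =>
        if PySem.Set.contains (pvHitFor label) category then d.modify category [] (· ++ [label]) else d) d)
      (mkFeat v1 v2 v3 v4 v5)
      = mkFeat (v1 ++ ls.filter (fun l => PySem.Set.contains (pvHitFor l) "exterior"))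
               (v2 ++ ls.filter (fun l => PySem.Set.contains (pvHitFor l) "interior"))
               (v3 ++ ls.filter (fun l => PySem.Set.contains (pvHitFor l) "technology"))
               (v4 ++ ls.filter (fun l => PySem.Set.contains (pvHitFor l) "safety"))
               (v5 ++ ls.filter (fun l => PySem.Set.contains (pvHitFor l) "modifications")) := by
  induction ls generalizing v1 v2 v3 v4 v5 with
  | nil => simp
  | cons l ls ih =>
    rw [List.foldl_cons]
    show ls.foldl _ (pvCategories.foldl _ (mkFeat v1 v2 v3 v4 v5)) = _
    rw [show pvCategories.foldl (fun d category =>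
          if PySem.Set.contains (pvHitFor l) category then d.modify category [] (· ++ [l]) else d)
          (mkFeat v1 v2 v3 v4 v5)
        = mkFeat (if PySem.Set.contains (pvHitFor l) "exterior" then v1 ++ [l] else v1)
                 (if PySem.Set.contains (pvHitFor l) "interior" then v2 ++ [l] else v2)
                 (if PySem.Set.contains (pvHitFor l) "technology" then v3 ++ [l] else v3)
                 (if PySem.Set.contains (pvHitFor l) "safety" then v4 ++ [l] else v4)
                 (if PySem.Set.contains (pvHitFor l) "modifications" then v5 ++ [l] else v5) by
        simp only [pvCategories, List.foldl_cons, List.foldl_nil]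
        rw [condModify_key1, condModify_key2, condModify_key3, condModify_key4, condModify_key5]]
    rw [ih]
    simp only [List.filter_cons]
    congr 1 <;> split <;> simp

-- ===== VERDICT (by name: the statement is the Claim_ definition above) =====
theorem extract_car_features_py_spec : Claim_equal_extract_car_features_py := by
  intro labels objects texts car_info _
  unfold Spec_extract_car_features_py
  simp only [extract_car_features_py, extract_car_features_py_alt]
  rw [show (PySem.Dict.ofList [("exterior", ([]:List String)), ("interior", []), ("technology", []), ("safety", []), ("modifications", [])]) = mkFeat [] [] [] [] [] from rfl]
  rw [show pvCategories.foldl (fun d category => d.insert category ([]:List String)) PySem.Dict.empty = mkFeat [] [] [] [] [] from rfl]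
  rw [loop_key1, loop_key2, loop_key3, loop_key4, loop_key5, loopB]
  simp only [hit_ext, hit_int, hit_tech, hit_safe, hit_mod]
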